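-- pv_equiv track=rewrite | github.com/HardM00N/BOJ | Programmers/기능개발.py | solution
-- ===== SOURCE A (Python) =====
-- def solution(progresses, speeds):
--     answer = []
--
--     while progresses :
--         fin = 0
--
--         while progresses and progresses[0] >= 100:
--             fin += 1
--             progresses.pop(0)
--             speeds.pop(0)
--
--         progresses = [progresses[i] + speeds[i] for i in range(len(progresses))]    # 작업 진행
--
--         if fin:
--             answer.append(fin)
--
--     return answer
-- ===== SOURCE B (Python) =====
-- # B: closed-form per-task finish days + one-pass grouping, O(n) instead of day-by-day simulation.
-- # Return-value equivalence only: A pops from the speeds list in place; B does not mutate its arguments.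
-- def solution(progresses, speeds):
--     answer = []
--     cur = -1
--     for p, s in zip(progresses, speeds):
--         d = 0 if p >= 100 else -((p - 100) // s)
--         if answer and d <= cur:
--             answer[-1] += 1
--         else:
--             answer.append(1)
--             cur = d
--     return answer
-- ===== Notes on version B (the rewrite author's own statement) =====
-- stated objective: alternative
-- what changed: B replaces A's day-by-day simulation (rebuilding the whole progress list every day) by a closed-form ceiling-division finish day per task and a single pass that groups tasks by non-decreasing finish day; intended as faster (O(n) vs O(n*days)) but a timing run could not measure a clean ratio because A timed out at n=16 where B returned.
-- outside the precondition, e.g. on solution([100], [0]): A returns [1], B returns [1]; on solution([50, 100], [50, -1]): A does not finish within the time limit, B returns [2]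
import Mathlib
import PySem

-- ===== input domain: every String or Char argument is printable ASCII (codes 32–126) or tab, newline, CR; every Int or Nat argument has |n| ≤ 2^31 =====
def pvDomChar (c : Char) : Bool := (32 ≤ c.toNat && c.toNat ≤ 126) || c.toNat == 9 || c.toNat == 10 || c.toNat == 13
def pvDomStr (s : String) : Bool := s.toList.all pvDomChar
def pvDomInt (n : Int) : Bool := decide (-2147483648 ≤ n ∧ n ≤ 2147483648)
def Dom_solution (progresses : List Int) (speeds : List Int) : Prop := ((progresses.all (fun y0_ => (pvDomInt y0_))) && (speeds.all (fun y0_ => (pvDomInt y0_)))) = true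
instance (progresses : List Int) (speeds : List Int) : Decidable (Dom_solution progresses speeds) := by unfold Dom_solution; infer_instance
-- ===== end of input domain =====

-- B replaces A's day-by-day simulation with closed-form ceiling-division finish days grouped in
-- one pass (intended as faster; a timing run could not confirm a ratio: A timed out at n=16
-- where B returned). Return-value equivalence only: Python A pops from `speeds` in place; B does
-- not mutate its arguments.


-- ===== PORT A =====
-- inner `while progresses and progresses[0] >= 100: fin += 1; progresses.pop(0); speeds.pop(0)`
-- (ss.tail is exact for speeds.pop(0) because Pre_ guarantees speeds is at least as long as progresses)
def popA : List Int → List Int → Int → Int × List Int × List Int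
  | [], ss, fin => (fin, [], ss)
  | p :: pt, ss, fin => if 100 ≤ p then popA pt ss.tail (fin + 1) else (fin, p :: pt, ss)

-- the outer `while progresses:` loop; fuel only totalizes the loop (A diverges outside Pre_);
-- the lemmas below show it is never exhausted on inputs satisfying Pre_
def loopA : Nat → List Int → List Int → List Int → List Int
  | 0, _, _, acc => acc
  | fuel + 1, ps, ss, acc =>
    if ps = [] then acc
    else
      let r := popA ps ss 0
      -- `[progresses[i] + speeds[i] for i in range(len(progresses))]`: exact as zipWith under Pre_
      -- (speeds at least as long as progresses)
      let ps2 := List.zipWith (· + ·) r.2.1 r.2.2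
      loopA fuel ps2 r.2.2 (if r.1 ≠ 0 then acc ++ [r.1] else acc)

def fuelA (ps : List Int) : Nat := 1 + ps.foldl (fun a p => a + (100 - p).toNat) 0

def solution (progresses : List Int) (speeds : List Int) : List Int :=
  loopA (fuelA progresses) progresses speeds []

-- ===== PORT B =====
-- `0 if p >= 100 else -((p - 100) // s)`
def tDays (p s : Int) : Int := if 100 ≤ p then 0 else -(PySem.Int.floordiv (p - 100) s)

-- B's single pass; `answer` is kept reversed so that `answer[-1] += 1` is a head update; reversed at the end
def loopB : List (Int × Int) → List Int → Int → List Int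
  | [], rev, _ => rev.reverse
  | q :: rest, rev, cur =>
    let d := tDays q.1 q.2
    match rev with
    | [] => loopB rest [1] d
    | b :: rt => if d ≤ cur then loopB rest ((b + 1) :: rt) cur else loopB rest (1 :: b :: rt) d

def solution_alt (progresses : List Int) (speeds : List Int) : List Int :=
  loopB (progresses.zip speeds) [] (-1)

-- ===== PRECONDITION & SPEC =====
-- Pre_ excludes inputs where speeds is shorter than progresses (A raises IndexError) and inputs with
-- a nonpositive speed among the first len(progresses) speeds: on those A loops forever except when
-- every such task happens to be at 100 the day it reaches the front, an accident of the simulation.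
def Pre_solution (progresses : List Int) (speeds : List Int) : Prop :=
  progresses.length ≤ speeds.length ∧ ∀ q ∈ progresses.zip speeds, 0 < q.2
instance (progresses : List Int) (speeds : List Int) : Decidable (Pre_solution progresses speeds) := by
  unfold Pre_solution; infer_instance

def pvWitness_solution : List Int × List Int := ([30, 95, 100], [30, 5, 1])

def Spec_solution (progresses : List Int) (speeds : List Int) (out : List Int) : Prop :=
  out = solution_alt progresses speeds
instance (progresses : List Int) (speeds : List Int) (out : List Int) : Decidable (Spec_solution progresses speeds out) := by unfold Spec_solution; infer_instance

-- ===== CLAIM (what is proved, stated in full; the proofs are below) =====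
def Claim_equal_solution : Prop := ∀ (progresses : List Int) (speeds : List Int), Dom_solution progresses speeds → Pre_solution progresses speeds → Spec_solution progresses speeds (solution progresses speeds)

-- ===== LEMMAS AND PROOFS =====

-- reference grouping: batches of tasks by non-decreasing finish day (leader opens the batch)
def groups : List (Int × Int) → List Int
  | [] => []
  | q :: rest =>
    (1 + ((rest.takeWhile fun r => decide (tDays r.1 r.2 ≤ tDays q.1 q.2)).length : Int))
      :: groups (rest.dropWhile fun r => decide (tDays r.1 r.2 ≤ tDays q.1 q.2))
  termination_by l => l.length
  decreasing_by
    simpa using Nat.lt_succ_of_le (List.length_dropWhile_le _ _)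

-- the remaining tasks after d days of work
def stateP (l : List (Int × Int)) (d : Int) : List Int := l.map fun q => q.1 + d * q.2

theorem head?_dropWhile_not {α : Type} (p : α → Bool) (l : List α) (x : α)
    (h : (l.dropWhile p).head? = some x) : ¬ p x = true := by
  induction l with
  | nil => simp [List.dropWhile] at h
  | cons a t ih =>
    rw [List.dropWhile_cons] at h
    by_cases hp : p a = true
    · simp [hp] at h; exact ih h
    · simp [hp] at h; simpa [h] using hp

-- a task is poppable on day d iff its finish day is ≤ d
theorem pop_iff (p s d : Int) (hs : 0 < s) (hd : 0 ≤ d) :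
    (100 ≤ p + d * s) ↔ tDays p s ≤ d := by
  unfold tDays
  by_cases hp : 100 ≤ p
  · simp only [if_pos hp]
    exact ⟨fun _ => hd, fun _ => by nlinarith⟩
  · simp only [if_neg hp]
    rw [neg_le, PySem.Int.le_floordiv_iff_mul_le hs]
    constructor <;> intro h <;> nlinarith

theorem tDays_nonneg (p s : Int) (hs : 0 < s) : 0 ≤ tDays p s := by
  unfold tDays
  by_cases hp : 100 ≤ p
  · simp [hp]
  · simp only [if_neg hp, Left.nonneg_neg_iff]
    have := (PySem.Int.floordiv_lt_iff_lt_mul (a := p - 100) (q := 1) hs).2 (by nlinarith)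
    omega

theorem tDays_le_toNat (p s : Int) (hs : 0 < s) : tDays p s ≤ ((100 - p).toNat : Int) := by
  unfold tDays
  by_cases hp : 100 ≤ p
  · simp [hp]
  · simp only [if_neg hp]
    have h100 : ((100 - p).toNat : Int) = 100 - p := Int.toNat_of_nonneg (by omega)
    rw [h100, neg_le]
    exact (PySem.Int.le_floordiv_iff_mul_le hs).2 (by nlinarith)

theorem foldl_ge_init (f : Int → Nat) (l : List Int) (a : Nat) :
    a ≤ l.foldl (fun a x => a + f x) a := by
  induction l generalizing a with
  | nil => simp
  | cons x t ih => simpa [List.foldl] using Nat.le_trans (Nat.le_add_right a (f x)) (ih (a + f x))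

theorem mem_le_foldl (f : Int → Nat) (l : List Int) (a : Nat) (p : Int) (hp : p ∈ l) :
    f p ≤ l.foldl (fun a x => a + f x) a := by
  induction l generalizing a with
  | nil => simp at hp
  | cons x t ih =>
    rcases List.mem_cons.1 hp with h | h
    · subst h
      exact Nat.le_trans (Nat.le_add_left (f p) a) (foldl_ge_init f t (a + f p))
    · exact ih _ h

-- popA on the day-d state pops exactly the prefix of finish day ≤ d
theorem popA_state (l : List (Int × Int)) (d : Int) (ex : List Int) (f : Int)
    (hpos : ∀ q ∈ l, 0 < q.2) (hd : 0 ≤ d) :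
    popA (stateP l d) (l.map Prod.snd ++ ex) f
      = (f + ((l.takeWhile fun r => decide (tDays r.1 r.2 ≤ d)).length : Int),
         stateP (l.dropWhile fun r => decide (tDays r.1 r.2 ≤ d)) d,
         (l.dropWhile fun r => decide (tDays r.1 r.2 ≤ d)).map Prod.snd ++ ex) := by
  induction l generalizing f with
  | nil => simp [stateP, popA]
  | cons q t ih =>
    have hq : 0 < q.2 := hpos q (List.mem_cons_self ..)
    have hiff := pop_iff q.1 q.2 d hq hd
    by_cases hle : tDays q.1 q.2 ≤ d
    · have h100 : 100 ≤ q.1 + d * q.2 := hiff.2 hle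
      have ih' := ih (f + 1) (fun r hr => hpos r (List.mem_cons_of_mem _ hr))
      simp only [stateP] at ih' ⊢
      simp only [List.map_cons, popA, List.cons_append, List.tail_cons, if_pos h100,
        List.takeWhile_cons, List.dropWhile_cons, hle, decide_true, if_true]
      rw [ih']
      refine Prod.ext ?_ rfl
      simp only [List.length_cons]
      push_cast; ring
    · have h100 : ¬ 100 ≤ q.1 + d * q.2 := fun h => hle (hiff.1 h)
      simp [stateP, popA, h100, hle]

-- one day of work turns the day-d state into the day-(d+1) state
theorem zip_step (l : List (Int × Int)) (d : Int) (ex : List Int) :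
    List.zipWith (· + ·) (stateP l d) (l.map Prod.snd ++ ex) = stateP l (d + 1) := by
  induction l with
  | nil => simp [stateP]
  | cons q t ih =>
    simp only [stateP, List.map_cons, List.cons_append, List.zipWith_cons_cons] at *
    rw [ih]; congr 1; ring

-- main simulation lemma: A's loop from the day-d state produces the batches of `groups`
theorem loopA_eq_groups (fuel : Nat) : ∀ (l : List (Int × Int)) (d : Int) (ex acc : List Int)
    (M : Int),
    (∀ q ∈ l, 0 < q.2) → 0 ≤ d →
    (∀ q, l.head? = some q → d ≤ tDays q.1 q.2) →
    (∀ q ∈ l, tDays q.1 q.2 ≤ M) →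
    (l = [] ∨ fuel ≥ 1 + (M - d).toNat) →
    loopA fuel (stateP l d) (l.map Prod.snd ++ ex) acc = acc ++ groups l := by
  induction fuel with
  | zero =>
    intro l d ex acc M hpos hd hhead hM hfuel
    rcases hfuel with h | h
    · subst h; simp [loopA, groups]
    · omega
  | succ fuel ih =>
    intro l d ex acc M hpos hd hhead hM hfuel
    match l with
    | [] => simp [stateP, loopA, groups]
    | q :: t =>
      have hq : 0 < q.2 := hpos q (List.mem_cons_self ..)
      have hdq : d ≤ tDays q.1 q.2 := hhead q rfl
      have hMq : tDays q.1 q.2 ≤ M := hM q (List.mem_cons_self ..)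
      have hfuel' : fuel + 1 ≥ 1 + (M - d).toNat := by
        rcases hfuel with h | h
        · simp at h
        · exact h
      have hne : stateP (q :: t) d ≠ [] := by simp [stateP]
      rw [loopA, if_neg hne, popA_state (q :: t) d ex 0 hpos hd]
      have hposD : ∀ r ∈ (q :: t).dropWhile (fun r => decide (tDays r.1 r.2 ≤ d)), 0 < r.2 :=
        fun r hr => hpos r ((List.dropWhile_sublist _).mem hr)
      have hMD : ∀ r ∈ (q :: t).dropWhile (fun r => decide (tDays r.1 r.2 ≤ d)),
          tDays r.1 r.2 ≤ M :=
        fun r hr => hM r ((List.dropWhile_sublist _).mem hr)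
      have hheadD : ∀ r, ((q :: t).dropWhile (fun r => decide (tDays r.1 r.2 ≤ d))).head?
          = some r → d + 1 ≤ tDays r.1 r.2 := by
        intro r hr
        have := head?_dropWhile_not _ _ r hr
        simp only [decide_eq_true_eq] at this
        omega
      have hfuelD : ((q :: t).dropWhile (fun r => decide (tDays r.1 r.2 ≤ d))) = [] ∨
          fuel ≥ 1 + (M - (d + 1)).toNat := by
        cases hdrop : (q :: t).dropWhile (fun r => decide (tDays r.1 r.2 ≤ d)) with
        | nil => exact Or.inl rfl
        | cons r rest =>
          refine Or.inr ?_
          have h1 : d + 1 ≤ tDays r.1 r.2 := by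
            apply hheadD; rw [hdrop]; rfl
          have h2 : tDays r.1 r.2 ≤ M := by
            apply hMD; rw [hdrop]; exact List.mem_cons_self ..
          omega
      by_cases hle : tDays q.1 q.2 ≤ d
      · -- a batch finishes today: the leading tasks are popped and appended as one count
        have htq : tDays q.1 q.2 = d := le_antisymm hle hdq
        rw [List.dropWhile_cons_of_pos (by simpa using hle)] at hposD hMD hheadD hfuelD
        rw [List.takeWhile_cons_of_pos (by simpa using hle),
            List.dropWhile_cons_of_pos (by simpa using hle)]
        have hfin : (0 : Int) + ((q :: t.takeWhile fun r => decide (tDays r.1 r.2 ≤ d)).length : Int) ≠ 0 := by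
          simp only [List.length_cons]
          push_cast
          omega
        simp only [zip_step, if_pos hfin]
        rw [ih _ (d + 1) ex _ M hposD (by omega) hheadD hMD hfuelD]
        rw [groups]
        simp only [htq, List.length_cons, List.append_assoc, List.singleton_append]
        push_cast
        ring_nf
      · -- nothing finishes today: no batch is appended, one more day of work
        rw [List.takeWhile_cons_of_neg (by simpa using hle),
            List.dropWhile_cons_of_neg (by simpa using hle)]
        have hfin : ¬ ((0 : Int) + (([] : List (Int × Int)).length : Int) ≠ 0) := by simp
        simp only [zip_step, if_neg hfin]
        exact ih (q :: t) (d + 1) ex acc M hpos (by omega)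
          (fun r hr => by
            have hrq : q = r := by simpa using hr
            subst hrq; omega)
          hM (Or.inr (by omega))

-- B's loop with a started batch (head of rev, opened at finish day cur)
theorem loopB_cons (l : List (Int × Int)) : ∀ (b : Int) (rt : List Int) (cur : Int),
    loopB l (b :: rt) cur
      = rt.reverse ++ ((b + ((l.takeWhile fun r => decide (tDays r.1 r.2 ≤ cur)).length : Int))
          :: groups (l.dropWhile fun r => decide (tDays r.1 r.2 ≤ cur))) := by
  induction l with
  | nil => intro b rt cur; simp [loopB, groups]
  | cons q t ih =>
    intro b rt cur
    by_cases hle : tDays q.1 q.2 ≤ cur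
    · rw [loopB, if_pos hle, ih (b + 1) rt cur,
        List.takeWhile_cons_of_pos (by simpa using hle),
        List.dropWhile_cons_of_pos (by simpa using hle)]
      simp only [List.length_cons]
      push_cast
      ring_nf
    · rw [loopB, if_neg hle, ih 1 (b :: rt) (tDays q.1 q.2),
        List.takeWhile_cons_of_neg (by simpa using hle),
        List.dropWhile_cons_of_neg (by simpa using hle), groups]
      simp

theorem loopB_eq_groups (l : List (Int × Int)) (cur : Int) : loopB l [] cur = groups l := by
  cases l with
  | nil => simp [loopB, groups]
  | cons q t =>
    rw [loopB]
    rw [loopB_cons t 1 [] (tDays q.1 q.2), groups]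
    simp

-- (ps.zip ss).map Prod.snd is the first len(ps) speeds
theorem map_snd_zip_take (ps ss : List Int) (h : ps.length ≤ ss.length) :
    (ps.zip ss).map Prod.snd = ss.take ps.length := by
  induction ps generalizing ss with
  | nil => simp
  | cons p pt ih =>
    cases ss with
    | nil => simp at h
    | cons s st =>
      simp only [List.zip_cons_cons, List.map_cons, List.length_cons, List.take_succ_cons]
      rw [ih st (by simpa using h)]

-- ===== VERDICT (by name: the statement is the Claim_ definition above) =====
theorem solution_spec : Claim_equal_solution := by
  unfold Claim_equal_solution Spec_solution
  intro ps ss _ hpre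
  obtain ⟨hlen, hpos⟩ := hpre
  have hfst : stateP (ps.zip ss) 0 = ps := by
    have : (fun (q : Int × Int) => q.1 + 0 * q.2) = Prod.fst := by funext q; ring
    rw [stateP, this, List.map_fst_zip hlen]
  have hsnd : (ps.zip ss).map Prod.snd ++ ss.drop ps.length = ss := by
    rw [map_snd_zip_take ps ss hlen, List.take_append_drop]
  have hM : ∀ q ∈ ps.zip ss, tDays q.1 q.2
      ≤ ((ps.foldl (fun a p => a + (100 - p).toNat) 0 : Nat) : Int) := by
    intro q hq
    have h1 : q.1 ∈ ps := (List.of_mem_zip hq).1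
    have h2 := tDays_le_toNat q.1 q.2 (hpos q hq)
    have h3 := mem_le_foldl (fun p => (100 - p).toNat) ps 0 q.1 h1
    calc tDays q.1 q.2 ≤ (((100 - q.1).toNat : Nat) : Int) := h2
      _ ≤ _ := by exact_mod_cast h3
  have hhead : ∀ q, (ps.zip ss).head? = some q → (0 : Int) ≤ tDays q.1 q.2 := by
    intro q hq
    exact tDays_nonneg q.1 q.2 (hpos q (List.mem_of_mem_head? (by rw [hq]; exact Option.mem_some_self q)))
  have := loopA_eq_groups (fuelA ps) (ps.zip ss) 0 (ss.drop ps.length) []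
    ((ps.foldl (fun a p => a + (100 - p).toNat) 0 : Nat) : Int)
    hpos le_rfl hhead hM
    (Or.inr (by simp [fuelA]))
  rw [hfst, hsnd] at this
  unfold solution solution_alt
  rw [this, loopB_eq_groups]
  simp
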